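-- pv_equiv track=rewrite | github.com/Beliavsky/Pure-Fortran | xpower.py | split_code_comment
-- ===== SOURCE A (Python) =====
-- from typing import Iterable, List, Optional, Tuple
--
-- def split_code_comment(line: str) -> Tuple[str, str]:
--     """Split one line into code and trailing comment, respecting quotes."""
--     in_single = False
--     in_double = False
--     i = 0
--     while i < len(line):
--         ch = line[i]
--         if ch == "'" and not in_double:
--             if in_single and i + 1 < len(line) and line[i + 1] == "'":
--                 i += 2
--                 continue
--             in_single = not in_single
--             i += 1
--             continue
--         if ch == '"' and not in_single:
--             if in_double and i + 1 < len(line) and line[i + 1] == '"':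
--                 i += 2
--                 continue
--             in_double = not in_double
--             i += 1
--             continue
--         if ch == "!" and not in_single and not in_double:
--             return line[:i], line[i:]
--         i += 1
--     return line, ""
-- ===== SOURCE B (Python) =====
-- def split_code_comment(line):
--     """Split one line into code and trailing comment, respecting quotes.
--
--     Jump-based scan: instead of stepping char by char with quote-state
--     booleans, repeatedly locate the next delimiter (quote or '!') with
--     str.find and skip whole quoted spans at once.
--     """
--     n = len(line)
--     i = 0
--     while True:
--         j = n
--         for q in ("'", '"', '!'):
--             k = line.find(q, i)
--             if k != -1 and k < j:
--                 j = k
--         if j == n: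
--             return line, ""
--         if line[j] == '!':
--             return line[:j], line[j:]
--         k = line.find(line[j], j + 1)
--         if k == -1:
--             return line, ""
--         i = k + 1
-- ===== Notes on version B (the rewrite author's own statement) =====
-- stated objective: faster
-- what changed: Replaces A's per-character index loop with in_single/in_double state booleans and quote-doubling lookahead by a jump scanner that repeatedly locates the next delimiter with str.find and skips whole quoted spans at once, with no per-character state.
import Mathlib
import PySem

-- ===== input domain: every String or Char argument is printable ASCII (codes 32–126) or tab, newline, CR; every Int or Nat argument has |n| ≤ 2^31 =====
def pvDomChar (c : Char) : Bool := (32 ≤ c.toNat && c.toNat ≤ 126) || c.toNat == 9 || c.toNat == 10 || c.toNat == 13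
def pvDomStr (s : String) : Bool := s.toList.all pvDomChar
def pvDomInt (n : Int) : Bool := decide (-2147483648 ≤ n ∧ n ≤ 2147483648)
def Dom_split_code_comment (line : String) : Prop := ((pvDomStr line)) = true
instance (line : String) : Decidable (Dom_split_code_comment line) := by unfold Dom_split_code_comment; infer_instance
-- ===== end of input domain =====

-- B replaces A's per-character quote-state loop by a jump scanner (find next delimiter,
-- skip whole quoted spans with str.find); same result, measurably faster by a constant factor.

-- ===== PORT A =====
-- strings are handled via List Char (String.toList / String.mk), index tests l[i+1]? = some c
-- mirror Python's `i+1 < len(line) and line[i+1] == c` exactly.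
def splitALoop (l : List Char) : Nat → Nat → Bool → Bool → List Char × List Char
  | 0, _, _, _ => (l, [])  -- fuel guard only; never reached when started with fuel = l.length + 1
  | fuel + 1, i, ins, ind =>
    if _h : i < l.length then
      let ch := l[i]
      if ch = '\'' ∧ ind = false then
        if ins = true ∧ l[i+1]? = some '\'' then
          splitALoop l fuel (i+2) ins ind
        else
          splitALoop l fuel (i+1) (!ins) ind
      else if ch = '"' ∧ ins = false then
        if ind = true ∧ l[i+1]? = some '"' then
          splitALoop l fuel (i+2) ins ind
        else
          splitALoop l fuel (i+1) ins (!ind)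
      else if ch = '!' ∧ ins = false ∧ ind = false then
        (l.take i, l.drop i)
      else
        splitALoop l fuel (i+1) ins ind
    else (l, [])

def split_code_comment (line : String) : String × String :=
  let r := splitALoop line.toList (line.toList.length + 1) 0 false false
  (String.mk r.1, String.mk r.2)

-- ===== PORT B =====
-- hand port of Python str.find(c, i): first index ≥ i holding c, none if absent (exact).
def findFromGo (c : Char) : List Char → Nat → Option Nat
  | [], _ => none
  | x :: xs, idx => if x = c then some idx else findFromGo c xs (idx + 1)

def findFrom (l : List Char) (c : Char) (i : Nat) : Option Nat :=
  findFromGo c (l.drop i) i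

-- one step of B's `for q in (…): k = line.find(q, i); if k != -1 and k < j: j = k`
def minFind (l : List Char) (q : Char) (i j : Nat) : Nat :=
  match findFrom l q i with
  | some k => if k < j then k else j
  | none => j

def splitBLoop (l : List Char) : Nat → Nat → List Char × List Char
  | 0, _ => (l, [])  -- fuel guard only; never reached when started with fuel = l.length + 1
  | fuel + 1, i =>
    let j := minFind l '!' i (minFind l '"' i (minFind l '\'' i l.length))
    if hj : j < l.length then
      if l[j] = '!' then (l.take j, l.drop j)
      else
        match findFrom l (l[j]) (j + 1) with
        | some k => splitBLoop l fuel (k + 1)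
        | none => (l, [])
    else (l, [])

def split_code_comment_alt (line : String) : String × String :=
  let r := splitBLoop line.toList (line.toList.length + 1) 0
  (String.mk r.1, String.mk r.2)

-- ===== PRECONDITION & SPEC =====
def Spec_split_code_comment (line : String) (out : String × String) : Prop := out = split_code_comment_alt line
instance (line : String) (out : String × String) : Decidable (Spec_split_code_comment line out) := by unfold Spec_split_code_comment; infer_instance

-- ===== CLAIM (what is proved, stated in full; the proofs are below) =====
def Claim_equal_split_code_comment : Prop := ∀ (line : String), Dom_split_code_comment line → Spec_split_code_comment line (split_code_comment line)

-- ===== LEMMAS AND PROOFS =====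

-- reference scanner: index (relative) of the comment start in the suffix, given the quote mode
def scanS : List Char → Option Char → Option Nat
  | [], _ => none
  | c :: rest, some q =>
      if c = q then (scanS rest none).map (· + 1) else (scanS rest (some q)).map (· + 1)
  | c :: rest, none =>
      if c = '!' then some 0
      else if c = '\'' ∨ c = '"' then (scanS rest (some c)).map (· + 1)
      else (scanS rest none).map (· + 1)

def resOf (l : List Char) (o : Option Nat) : List Char × List Char :=
  match o with
  | none => (l, [])
  | some j => (l.take j, l.drop j)

def enc (ins ind : Bool) : Option Char :=
  if ins then some '\'' else if ind then some '"' else none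

theorem resOf_map_eq (l : List Char) (o : Option Nat) (f g : Nat → Nat)
    (h : ∀ x, f x = g x) : resOf l (o.map f) = resOf l (o.map g) := by
  cases o <;> simp [resOf, h]

theorem scanS_close (q : Char) (rest : List Char) :
    scanS (q :: rest) (some q) = (scanS rest none).map (· + 1) := by simp [scanS]

theorem scanS_in (c q : Char) (rest : List Char) (h : c ≠ q) :
    scanS (c :: rest) (some q) = (scanS rest (some q)).map (· + 1) := by simp [scanS, h]

theorem scanS_bang (rest : List Char) : scanS ('!' :: rest) none = some 0 := by simp [scanS]

theorem scanS_sq (rest : List Char) :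
    scanS ('\'' :: rest) none = (scanS rest (some '\'')).map (· + 1) := by simp [scanS]

theorem scanS_dq (rest : List Char) :
    scanS ('"' :: rest) none = (scanS rest (some '"')).map (· + 1) := by simp [scanS]

theorem scanS_other (c : Char) (rest : List Char) (h1 : c ≠ '\'') (h2 : c ≠ '"') (h3 : c ≠ '!') :
    scanS (c :: rest) none = (scanS rest none).map (· + 1) := by simp [scanS, h1, h2, h3]

theorem enc_tf : enc true false = some '\'' := by simp [enc]

theorem enc_ft : enc false true = some '"' := by simp [enc]

theorem enc_ff : enc false false = none := by simp [enc]

theorem findFromGo_some_ge (c : Char) (xs : List Char) (idx k : Nat)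
    (h : findFromGo c xs idx = some k) : idx ≤ k := by
  induction xs generalizing idx with
  | nil => simp [findFromGo] at h
  | cons x xs ih =>
    unfold findFromGo at h
    split at h
    · injection h with h; omega
    · have := ih (idx + 1) h; omega

theorem findFromGo_some_lt (c : Char) (xs : List Char) (idx k : Nat)
    (h : findFromGo c xs idx = some k) : k < idx + xs.length := by
  induction xs generalizing idx with
  | nil => simp [findFromGo] at h
  | cons x xs ih =>
    unfold findFromGo at h
    split at h
    · simp at h; simp; omega
    · have := ih (idx + 1) h; simp; omega

theorem findFrom_some_ge (l : List Char) (c : Char) (i k : Nat)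
    (h : findFrom l c i = some k) : i ≤ k := findFromGo_some_ge _ _ _ _ h

theorem findFrom_some_lt (l : List Char) (c : Char) (i k : Nat)
    (h : findFrom l c i = some k) : k < l.length := by
  by_cases hi : i ≤ l.length
  · have h1 := findFromGo_some_lt c (l.drop i) i k h
    have h2 : (l.drop i).length = l.length - i := List.length_drop
    omega
  · unfold findFrom at h
    rw [show l.drop i = [] from List.drop_eq_nil_of_le (by omega)] at h
    simp [findFromGo] at h

theorem minFind_le (l : List Char) (q : Char) (i j : Nat) : minFind l q i j ≤ j := by
  unfold minFind
  cases findFrom l q i with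
  | none => simp
  | some k => simp; split <;> omega

theorem minFind_ge_of_lt (l : List Char) (q : Char) (i j : Nat)
    (h : minFind l q i j < j) : i ≤ minFind l q i j := by
  unfold minFind at *
  cases hf : findFrom l q i with
  | none => simp [hf] at h
  | some k =>
    have hik := findFrom_some_ge l q i k hf
    simp only [hf] at h ⊢
    split_ifs at h ⊢ <;> omega

theorem jspec_ge (l : List Char) (i : Nat)
    (h : minFind l '!' i (minFind l '"' i (minFind l '\'' i l.length)) < l.length) :
    i ≤ minFind l '!' i (minFind l '"' i (minFind l '\'' i l.length)) := by
  have h1 := minFind_le l '\'' i l.length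
  have h2 := minFind_le l '"' i (minFind l '\'' i l.length)
  have h3 := minFind_le l '!' i (minFind l '"' i (minFind l '\'' i l.length))
  rcases Nat.lt_or_ge (minFind l '!' i (minFind l '"' i (minFind l '\'' i l.length)))
      (minFind l '"' i (minFind l '\'' i l.length)) with hlt | hge
  · exact minFind_ge_of_lt _ _ _ _ hlt
  · have e3 : minFind l '!' i (minFind l '"' i (minFind l '\'' i l.length))
        = minFind l '"' i (minFind l '\'' i l.length) := by omega
    rcases Nat.lt_or_ge (minFind l '"' i (minFind l '\'' i l.length))
        (minFind l '\'' i l.length) with hlt | hge2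
    · have := minFind_ge_of_lt l '"' i (minFind l '\'' i l.length) hlt; omega
    · have e2 : minFind l '"' i (minFind l '\'' i l.length) = minFind l '\'' i l.length := by omega
      rcases Nat.lt_or_ge (minFind l '\'' i l.length) l.length with hlt | hge3
      · have := minFind_ge_of_lt l '\'' i l.length hlt; omega
      · omega

theorem findFromGo_none (c : Char) (xs : List Char) (idx : Nat)
    (h : findFromGo c xs idx = none) : c ∉ xs := by
  induction xs generalizing idx with
  | nil => simp
  | cons x xs ih =>
    unfold findFromGo at h
    split at h
    · exact absurd h (by simp)
    · rename_i hxc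
      intro hmem
      rcases List.mem_cons.mp hmem with he | ht
      · exact hxc he.symm
      · exact ih (idx + 1) h ht

theorem findFromGo_some_at (c : Char) (xs : List Char) (idx k : Nat)
    (h : findFromGo c xs idx = some k) : xs[k - idx]? = some c := by
  induction xs generalizing idx with
  | nil => simp [findFromGo] at h
  | cons x xs ih =>
    unfold findFromGo at h
    split at h
    · injection h with h; subst h; simp_all
    · have hge := findFromGo_some_ge c xs (idx + 1) k h
      have := ih (idx + 1) h
      rw [show k - idx = (k - (idx + 1)) + 1 by omega]
      simpa using this

theorem findFromGo_some_before (c : Char) (xs : List Char) (idx k : Nat)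
    (h : findFromGo c xs idx = some k) :
    ∀ m, idx ≤ m → m < k → xs[m - idx]? ≠ some c := by
  induction xs generalizing idx with
  | nil => simp [findFromGo] at h
  | cons x xs ih =>
    unfold findFromGo at h
    intro m hm1 hm2
    split at h
    · injection h with h; omega
    · rename_i hxc
      rcases Nat.eq_or_lt_of_le hm1 with he | hlt
      · subst he
        simp only [Nat.sub_self, List.getElem?_cons_zero]
        intro hc; injection hc with hc; exact hxc hc
      · have := ih (idx + 1) h m hlt hm2
        rw [show m - idx = (m - (idx + 1)) + 1 by omega]
        simpa using this

theorem getElem?_drop' (l : List Char) (i n : Nat) : (l.drop i)[n]? = l[i + n]? := by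
  simp [List.getElem?_drop]

theorem findFrom_none (l : List Char) (c : Char) (i : Nat)
    (h : findFrom l c i = none) : ∀ m, i ≤ m → l[m]? ≠ some c := by
  intro m hm hc
  have hmem : c ∈ l.drop i := by
    have : (l.drop i)[m - i]? = some c := by
      rw [getElem?_drop', show i + (m - i) = m by omega]; exact hc
    exact List.mem_of_getElem? this
  exact findFromGo_none c (l.drop i) i h hmem

theorem findFrom_some_at (l : List Char) (c : Char) (i k : Nat)
    (h : findFrom l c i = some k) : l[k]? = some c := by
  have hge := findFrom_some_ge l c i k h
  have := findFromGo_some_at c (l.drop i) i k h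
  rw [getElem?_drop', show i + (k - i) = k by omega] at this
  exact this

theorem findFrom_some_before (l : List Char) (c : Char) (i k : Nat)
    (h : findFrom l c i = some k) : ∀ m, i ≤ m → m < k → l[m]? ≠ some c := by
  intro m hm1 hm2
  have := findFromGo_some_before c (l.drop i) i k h m hm1 hm2
  rw [getElem?_drop', show i + (m - i) = m by omega] at this
  exact this

theorem minFind_not_before (l : List Char) (q : Char) (i j : Nat) :
    ∀ m, i ≤ m → m < minFind l q i j → l[m]? ≠ some q := by
  intro m hm1 hm2
  unfold minFind at hm2
  cases hf : findFrom l q i with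
  | none => exact findFrom_none l q i hf m hm1
  | some k =>
    rw [hf] at hm2
    have hmk : m < k := by
      by_cases hkj : k < j
      · simp only [if_pos hkj] at hm2; omega
      · simp only [if_neg hkj] at hm2; omega
    exact findFrom_some_before l q i k hf m hm1 hmk

theorem scanS_skip_none (seg rest : List Char)
    (h : ∀ c ∈ seg, ¬(c = '\'' ∨ c = '"' ∨ c = '!')) :
    scanS (seg ++ rest) none = (scanS rest none).map (· + seg.length) := by
  induction seg with
  | nil => cases hs : scanS rest none <;> simp [hs]
  | cons c seg ih =>
    have hc := h c (by simp)
    have ih' := ih (fun x hx => h x (by simp [hx]))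
    simp only [List.cons_append, scanS]
    rw [if_neg (by tauto), if_neg (by tauto), ih']
    cases scanS rest none <;> simp <;> omega

theorem scanS_skip_quote (q : Char) (seg rest : List Char)
    (h : ∀ c ∈ seg, c ≠ q) :
    scanS (seg ++ rest) (some q) = (scanS rest (some q)).map (· + seg.length) := by
  induction seg with
  | nil => cases hs : scanS rest (some q) <;> simp [hs]
  | cons c seg ih =>
    have hc := h c (by simp)
    have ih' := ih (fun x hx => h x (by simp [hx]))
    simp only [List.cons_append, scanS]
    rw [if_neg hc, ih']
    cases scanS rest (some q) <;> simp <;> omega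

theorem drop_decomp (l : List Char) (i j : Nat) (hij : i ≤ j) :
    l.drop i = (l.drop i).take (j - i) ++ l.drop j := by
  conv_lhs => rw [← List.take_append_drop (j - i) (l.drop i)]
  rw [List.drop_drop, show i + (j - i) = j by omega]

theorem mem_seg (l : List Char) (i j : Nat) (c : Char)
    (hc : c ∈ (l.drop i).take (j - i)) : ∃ m, i ≤ m ∧ m < j ∧ l[m]? = some c := by
  obtain ⟨rel, hget⟩ := List.mem_iff_getElem?.mp hc
  have hrel : rel < j - i := by
    by_contra hge
    rw [List.getElem?_take_eq_none (by omega)] at hget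
    exact absurd hget (by simp)
  rw [List.getElem?_take_of_lt hrel, getElem?_drop'] at hget
  exact ⟨i + rel, by omega, by omega, hget⟩

theorem A_eq_S (l : List Char) (fuel i : Nat) (ins ind : Bool) :
    l.length < i + fuel → ¬(ins = true ∧ ind = true) →
    splitALoop l fuel i ins ind = resOf l ((scanS (l.drop i) (enc ins ind)).map (· + i)) := by
  fun_induction splitALoop l fuel i ins ind with
  | case1 i ins ind =>
    -- fuel exhausted: only reachable past the end of the line
    intro hb hx
    rw [List.drop_eq_nil_of_le (by omega)]
    simp [scanS, resOf]
  | case2 fuel i ins ind h ch hq hd ih =>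
    -- doubled '' inside a single-quoted string
    intro hb hx
    obtain ⟨hch, hind⟩ := hq
    obtain ⟨hins, hnext⟩ := hd
    subst hind; subst hins
    have h1 : i + 1 < l.length := (List.getElem?_eq_some_iff.mp hnext).1
    have hc2 : l[i + 1] = '\'' := by
      rw [List.getElem?_eq_getElem h1] at hnext; injection hnext
    rw [ih (by omega) hx, List.drop_eq_getElem_cons h, show l[i] = '\'' from hch,
        List.drop_eq_getElem_cons h1, hc2]
    rw [enc_tf, scanS_close, scanS_sq]
    simp only [Option.map_map]
    apply resOf_map_eq
    intro x
    simp only [Function.comp_apply]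
    omega
  | case3 fuel i ins ind h ch hq hd ih =>
    -- single quote toggles the state
    intro hb hx
    obtain ⟨hch, hind⟩ := hq
    subst hind
    rw [ih (by omega) (by simp), List.drop_eq_getElem_cons h, show l[i] = '\'' from hch]
    cases ins with
    | true =>
      rw [enc_tf, scanS_close, Bool.not_true, enc_ff]
      simp only [Option.map_map]
      apply resOf_map_eq
      intro x
      simp only [Function.comp_apply]
      omega
    | false =>
      rw [enc_ff, scanS_sq, Bool.not_false, enc_tf]
      simp only [Option.map_map]
      apply resOf_map_eq
      intro x
      simp only [Function.comp_apply]
      omega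
  | case4 fuel i ins ind h ch hn1 hq hd ih =>
    -- doubled "" inside a double-quoted string
    intro hb hx
    obtain ⟨hch, hins⟩ := hq
    obtain ⟨hind, hnext⟩ := hd
    subst hins; subst hind
    have h1 : i + 1 < l.length := (List.getElem?_eq_some_iff.mp hnext).1
    have hc2 : l[i + 1] = '"' := by
      rw [List.getElem?_eq_getElem h1] at hnext; injection hnext
    rw [ih (by omega) hx, List.drop_eq_getElem_cons h, show l[i] = '"' from hch,
        List.drop_eq_getElem_cons h1, hc2]
    rw [enc_ft, scanS_close, scanS_dq]
    simp only [Option.map_map]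
    apply resOf_map_eq
    intro x
    simp only [Function.comp_apply]
    omega
  | case5 fuel i ins ind h ch hn1 hq hd ih =>
    -- double quote toggles the state
    intro hb hx
    obtain ⟨hch, hins⟩ := hq
    subst hins
    rw [ih (by omega) (by simp), List.drop_eq_getElem_cons h, show l[i] = '"' from hch]
    cases ind with
    | true =>
      rw [enc_ft, scanS_close, Bool.not_true, enc_ff]
      simp only [Option.map_map]
      apply resOf_map_eq
      intro x
      simp only [Function.comp_apply]
      omega
    | false =>
      rw [enc_ff, scanS_dq, Bool.not_false, enc_ft]
      simp only [Option.map_map]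
      apply resOf_map_eq
      intro x
      simp only [Function.comp_apply]
      omega
  | case6 fuel i ins ind h ch hn1 hn2 hq =>
    -- unquoted '!': the comment starts here
    intro hb hx
    obtain ⟨hch, hins, hind⟩ := hq
    subst hins; subst hind
    rw [List.drop_eq_getElem_cons h, show l[i] = '!' from hch, enc_ff, scanS_bang]
    simp [resOf]
    rw [show ('!' : Char) = l[i] from hch.symm]
    exact (List.drop_eq_getElem_cons h).symm
  | case7 fuel i ins ind h ch hn1 hn2 hn3 ih =>
    -- ordinary character: state unchanged
    intro hb hx
    rw [ih (by omega) hx, List.drop_eq_getElem_cons h]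
    cases ins with
    | true =>
      cases ind with
      | true => exact absurd ⟨rfl, rfl⟩ hx
      | false =>
        have hne : l[i] ≠ '\'' := fun hc => hn1 ⟨hc, rfl⟩
        rw [enc_tf, scanS_in _ _ _ hne]
        simp only [Option.map_map]
        apply resOf_map_eq
        intro x
        simp only [Function.comp_apply]
        omega
    | false =>
      cases ind with
      | true =>
        have hne : l[i] ≠ '"' := fun hc => hn2 ⟨hc, rfl⟩
        rw [enc_ft, scanS_in _ _ _ hne]
        simp only [Option.map_map]
        apply resOf_map_eq
        intro x
        simp only [Function.comp_apply]
        omega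
      | false =>
        have hne1 : l[i] ≠ '\'' := fun hc => hn1 ⟨hc, rfl⟩
        have hne2 : l[i] ≠ '"' := fun hc => hn2 ⟨hc, rfl⟩
        have hne3 : l[i] ≠ '!' := fun hc => hn3 ⟨hc, rfl, rfl⟩
        rw [enc_ff, scanS_other _ _ hne1 hne2 hne3]
        simp only [Option.map_map]
        apply resOf_map_eq
        intro x
        simp only [Function.comp_apply]
        omega
  | case8 fuel i ins ind h =>
    intro hb hx
    rw [List.drop_eq_nil_of_le (by omega)]
    simp [scanS, resOf]

theorem scanS_drop_jump_none (l : List Char) (i j : Nat) (hij : i ≤ j) (hjn : j ≤ l.length)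
    (h : ∀ m, i ≤ m → m < j → ¬(l[m]? = some '\'' ∨ l[m]? = some '"' ∨ l[m]? = some '!')) :
    scanS (l.drop i) none = (scanS (l.drop j) none).map (· + (j - i)) := by
  conv_lhs => rw [drop_decomp l i j hij]
  rw [scanS_skip_none _ _ (fun c hc => by
    obtain ⟨m, h1, h2, hg⟩ := mem_seg l i j c hc
    intro hor
    exact h m h1 h2 (by rcases hor with h' | h' | h' <;> [exact Or.inl (h' ▸ hg); exact Or.inr (Or.inl (h' ▸ hg)); exact Or.inr (Or.inr (h' ▸ hg))]))]
  rw [List.length_take, List.length_drop, show min (j - i) (l.length - i) = j - i by omega]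

theorem scanS_drop_jump_quote (q : Char) (l : List Char) (i j : Nat) (hij : i ≤ j) (hjn : j ≤ l.length)
    (h : ∀ m, i ≤ m → m < j → l[m]? ≠ some q) :
    scanS (l.drop i) (some q) = (scanS (l.drop j) (some q)).map (· + (j - i)) := by
  conv_lhs => rw [drop_decomp l i j hij]
  rw [scanS_skip_quote q _ _ (fun c hc => by
    obtain ⟨m, h1, h2, hg⟩ := mem_seg l i j c hc
    intro hcq
    exact h m h1 h2 (hcq ▸ hg))]
  rw [List.length_take, List.length_drop, show min (j - i) (l.length - i) = j - i by omega]

theorem minFind_result (l : List Char) (q : Char) (i j : Nat) :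
    minFind l q i j = j ∨ l[minFind l q i j]? = some q := by
  cases hf : findFrom l q i with
  | none => left; simp [minFind, hf]
  | some k =>
    by_cases hkj : k < j
    · right
      have he : minFind l q i j = k := by simp [minFind, hf, if_pos hkj]
      rw [he]
      exact findFrom_some_at l q i k hf
    · left; simp [minFind, hf, if_neg hkj]

theorem j_nospecial (l : List Char) (i m : Nat) (hm1 : i ≤ m)
    (hm2 : m < minFind l '!' i (minFind l '"' i (minFind l '\'' i l.length))) :
    ¬(l[m]? = some '\'' ∨ l[m]? = some '"' ∨ l[m]? = some '!') := by
  have h2 := minFind_le l '"' i (minFind l '\'' i l.length)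
  have h3 := minFind_le l '!' i (minFind l '"' i (minFind l '\'' i l.length))
  rintro (hc | hc | hc)
  · exact minFind_not_before l '\'' i l.length m hm1 (by omega) hc
  · exact minFind_not_before l '"' i (minFind l '\'' i l.length) m hm1 (by omega) hc
  · exact minFind_not_before l '!' i (minFind l '"' i (minFind l '\'' i l.length)) m hm1 hm2 hc

theorem j_special (l : List Char) (i : Nat)
    (hj : minFind l '!' i (minFind l '"' i (minFind l '\'' i l.length)) < l.length) :
    l[minFind l '!' i (minFind l '"' i (minFind l '\'' i l.length))]? = some '\'' ∨
    l[minFind l '!' i (minFind l '"' i (minFind l '\'' i l.length))]? = some '"' ∨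
    l[minFind l '!' i (minFind l '"' i (minFind l '\'' i l.length))]? = some '!' := by
  rcases minFind_result l '!' i (minFind l '"' i (minFind l '\'' i l.length)) with he3 | hg3
  · rw [he3] at hj ⊢
    rcases minFind_result l '"' i (minFind l '\'' i l.length) with he2 | hg2
    · rw [he2] at hj ⊢
      rcases minFind_result l '\'' i l.length with he1 | hg1
      · rw [he1] at hj; omega
      · exact Or.inl hg1
    · exact Or.inr (Or.inl hg2)
  · exact Or.inr (Or.inr hg3)

theorem B_eq_S (l : List Char) (fuel i : Nat) :
    l.length < i + fuel →
    splitBLoop l fuel i = resOf l ((scanS (l.drop i) none).map (· + i)) := by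
  fun_induction splitBLoop l fuel i with
  | case1 i =>
    intro hb
    rw [List.drop_eq_nil_of_le (by omega)]
    simp [scanS, resOf]
  | case2 fuel i j hj hbang =>
    intro hb
    have hij : i ≤ j := jspec_ge l i hj
    have hs : scanS (l.drop j) none = some 0 := by
      rw [List.drop_eq_getElem_cons hj, hbang, scanS_bang]
    rw [scanS_drop_jump_none l i j hij (le_of_lt hj)
          (fun m h1 h2 => j_nospecial l i m h1 h2), hs]
    simp only [Option.map_some, resOf, Nat.zero_add]
    rw [show j - i + i = j by omega]
  | case3 fuel i j hj hne k hk ih =>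
    intro hb
    have hij : i ≤ j := jspec_ge l i hj
    have hsp : l[j]? = some '\'' ∨ l[j]? = some '"' ∨ l[j]? = some '!' := j_special l i hj
    have hq : l[j] = '\'' ∨ l[j] = '"' := by
      rw [List.getElem?_eq_getElem hj] at hsp
      rcases hsp with hc | hc | hc
      · exact Or.inl (by injection hc)
      · exact Or.inr (by injection hc)
      · exact absurd (by injection hc) hne
    have hk1 : j + 1 ≤ k := findFrom_some_ge l _ _ _ hk
    have hkl : k < l.length := findFrom_some_lt l _ _ _ hk
    have hkat : l[k]? = some l[j] := findFrom_some_at l _ _ _ hk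
    have hkc : l[k] = l[j] := by
      rw [List.getElem?_eq_getElem hkl] at hkat; injection hkat
    have hstep1 : scanS (l.drop j) none = (scanS (l.drop (j+1)) (some l[j])).map (· + 1) := by
      rw [List.drop_eq_getElem_cons hj]
      rcases hq with h' | h' <;> rw [h'] <;> [exact scanS_sq _; exact scanS_dq _]
    have hstep2 : scanS (l.drop (j+1)) (some l[j]) = (scanS (l.drop k) (some l[j])).map (· + (k - (j+1))) :=
      scanS_drop_jump_quote l[j] l (j+1) k hk1 (le_of_lt hkl)
        (fun m h1 h2 => findFrom_some_before l _ _ _ hk m h1 h2)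
    have hstep3 : scanS (l.drop k) (some l[j]) = (scanS (l.drop (k+1)) none).map (· + 1) := by
      rw [List.drop_eq_getElem_cons hkl, hkc]
      exact scanS_close _ _
    rw [ih (by omega), scanS_drop_jump_none l i j hij (le_of_lt hj)
          (fun m h1 h2 => j_nospecial l i m h1 h2), hstep1, hstep2, hstep3]
    simp only [Option.map_map]
    apply resOf_map_eq
    intro x
    simp only [Function.comp_apply]
    omega
  | case4 fuel i j hj hne hk =>
    intro hb
    have hij : i ≤ j := jspec_ge l i hj
    have hsp : l[j]? = some '\'' ∨ l[j]? = some '"' ∨ l[j]? = some '!' := j_special l i hj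
    have hq : l[j] = '\'' ∨ l[j] = '"' := by
      rw [List.getElem?_eq_getElem hj] at hsp
      rcases hsp with hc | hc | hc
      · exact Or.inl (by injection hc)
      · exact Or.inr (by injection hc)
      · exact absurd (by injection hc) hne
    have hstep1 : scanS (l.drop j) none = (scanS (l.drop (j+1)) (some l[j])).map (· + 1) := by
      rw [List.drop_eq_getElem_cons hj]
      rcases hq with h' | h' <;> rw [h'] <;> [exact scanS_sq _; exact scanS_dq _]
    have hrest : scanS (l.drop (j+1)) (some l[j]) = none := by
      have hnone := findFrom_none l l[j] (j+1) hk
      rw [scanS_drop_jump_quote l[j] l (j+1) l.length (by omega) le_rfl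
            (fun m h1 _ => hnone m h1)]
      simp [List.drop_length, scanS]
    rw [scanS_drop_jump_none l i j hij (le_of_lt hj)
          (fun m h1 h2 => j_nospecial l i m h1 h2), hstep1, hrest]
    simp [resOf]
  | case5 fuel i j hj =>
    intro hb
    by_cases hi : i ≤ l.length
    · have hjn : j = l.length := by
        have h1 := minFind_le l '\'' i l.length
        have h2 := minFind_le l '"' i (minFind l '\'' i l.length)
        have h3 := minFind_le l '!' i (minFind l '"' i (minFind l '\'' i l.length))
        omega
      rw [scanS_drop_jump_none l i l.length hi le_rfl
            (fun m h1 h2 => j_nospecial l i m h1 (by omega))]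
      simp [List.drop_length, scanS, resOf]
    · rw [List.drop_eq_nil_of_le (by omega)]
      simp [scanS, resOf]

-- ===== VERDICT (by name: the statement is the Claim_ definition above) =====
theorem split_code_comment_spec : Claim_equal_split_code_comment := by
  intro line _
  unfold Spec_split_code_comment split_code_comment split_code_comment_alt
  rw [A_eq_S line.toList (line.toList.length + 1) 0 false false (by omega) (by simp),
      B_eq_S line.toList (line.toList.length + 1) 0 (by omega)]
  rfl
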